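-- pv_equiv track=rewrite | github.com/StevenTammen/command-line-video-and-audio | lib/timestamps.py | add_files_to_correct_rows_in_df
-- ===== SOURCE A (Python) =====
-- def add_files_to_correct_rows_in_df(internal_timestamps, processed_files):
--     files_in_df = []
--     i = 0
--     len_processed_files = len(processed_files)
--     for internal_timestamp in internal_timestamps:
--         if(str(internal_timestamp).lower() == "nan"):
--             if(i > len_processed_files - 1):
--                 raise Exception("The number of video segments actually present is not sufficient to cover the non-segment-internal headers in segments.xlsx. Check the processed video segments and segments.xlsx to see where things went wrong.")
--             files_in_df.append(processed_files[i])
--             i = i + 1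
--         else:
--             files_in_df.append("")
--
--     if(len(files_in_df) != len(internal_timestamps)):
--         raise Exception("There is some issue causing the number of file rows to not match the number of headers in segments.xlsx. Check the processed video segments and segments.xlsx to see where things went wrong.")
--
--     return files_in_df
-- ===== SOURCE B (Python) =====
-- def add_files_to_correct_rows_in_df(internal_timestamps, processed_files):
--     nan_count = sum(1 for t in internal_timestamps if str(t).lower() == "nan")
--     if nan_count > len(processed_files):
--         raise Exception("The number of video segments actually present is not sufficient to cover the non-segment-internal headers in segments.xlsx. Check the processed video segments and segments.xlsx to see where things went wrong.")
--     it = iter(processed_files)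
--     return [next(it) if str(t).lower() == "nan" else "" for t in internal_timestamps]
-- ===== Notes on version B (the rewrite author's own statement) =====
-- stated objective: simpler
-- what changed: Replaces the index-tracking accumulator loop and the dead final length check with a single comprehension that draws from an iterator over processed_files, after one upfront count-based overflow check.
import Mathlib
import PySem

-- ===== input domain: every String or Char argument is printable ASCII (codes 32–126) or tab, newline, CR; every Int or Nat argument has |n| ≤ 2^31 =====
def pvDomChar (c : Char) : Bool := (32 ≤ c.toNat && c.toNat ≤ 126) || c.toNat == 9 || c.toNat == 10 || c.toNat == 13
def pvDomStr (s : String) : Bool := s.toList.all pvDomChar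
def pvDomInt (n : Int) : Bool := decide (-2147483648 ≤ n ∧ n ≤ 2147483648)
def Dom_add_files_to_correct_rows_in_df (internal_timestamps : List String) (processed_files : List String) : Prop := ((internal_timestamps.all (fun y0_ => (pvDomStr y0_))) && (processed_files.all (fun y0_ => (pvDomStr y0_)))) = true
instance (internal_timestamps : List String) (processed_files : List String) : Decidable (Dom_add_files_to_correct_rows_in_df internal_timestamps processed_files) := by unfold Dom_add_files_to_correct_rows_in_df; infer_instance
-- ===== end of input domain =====

-- B replaces A's index-tracking accumulator loop with a single pass consuming
-- processed_files like an iterator (objective: simpler; equivalence is about the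
-- return value on inputs where A returns, i.e. Pre_ below).

-- ===== PORT A =====
def pvLoopA (pfs : List String) : List String → List String → Int → List String
  | [], acc, _ => acc.reverse
  | t :: rest, acc, i =>
    if PySem.Str.lower t == "nan" then
      -- processed_files[i]; Pre_ guarantees i is in range (Python raises otherwise)
      pvLoopA pfs rest (((PySem.List.pyGet? pfs i).getD "") :: acc) (i + 1)
    else
      pvLoopA pfs rest ("" :: acc) i

def add_files_to_correct_rows_in_df (internal_timestamps : List String) (processed_files : List String) : List String :=
  -- the final length check of A is always true and returns files_in_df
  pvLoopA processed_files internal_timestamps [] 0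

-- ===== PORT B =====
-- the comprehension drawing from an iterator over processed_files
def pvLoopB : List String → List String → List String
  | [], _ => []
  | t :: rest, pf =>
    if PySem.Str.lower t == "nan" then pf.headD "" :: pvLoopB rest pf.tail
    else "" :: pvLoopB rest pf

def add_files_to_correct_rows_in_df_alt (internal_timestamps : List String) (processed_files : List String) : List String :=
  -- Source B's upfront overflow check only raises; Pre_ excludes those inputs
  pvLoopB internal_timestamps processed_files

-- ===== PRECONDITION & SPEC =====
-- Pre_ excludes exactly the inputs on which A raises: more "nan" timestamps than processed files.
def Pre_add_files_to_correct_rows_in_df (internal_timestamps : List String) (processed_files : List String) : Prop :=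
  (internal_timestamps.filter (fun t => PySem.Str.lower t == "nan")).length ≤ processed_files.length
instance (internal_timestamps : List String) (processed_files : List String) : Decidable (Pre_add_files_to_correct_rows_in_df internal_timestamps processed_files) := by unfold Pre_add_files_to_correct_rows_in_df; infer_instance
def pvWitness_add_files_to_correct_rows_in_df : List String × List String := (["nan", "1:23", "NaN"], ["a.mp4", "b.mp4"])

def Spec_add_files_to_correct_rows_in_df (internal_timestamps : List String) (processed_files : List String) (out : List String) : Prop := out = add_files_to_correct_rows_in_df_alt internal_timestamps processed_files
instance (internal_timestamps : List String) (processed_files : List String) (out : List String) : Decidable (Spec_add_files_to_correct_rows_in_df internal_timestamps processed_files out) := by unfold Spec_add_files_to_correct_rows_in_df; infer_instance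

-- ===== CLAIM =====
def Claim_equal_add_files_to_correct_rows_in_df : Prop := ∀ (internal_timestamps : List String) (processed_files : List String), Dom_add_files_to_correct_rows_in_df internal_timestamps processed_files → Pre_add_files_to_correct_rows_in_df internal_timestamps processed_files → Spec_add_files_to_correct_rows_in_df internal_timestamps processed_files (add_files_to_correct_rows_in_df internal_timestamps processed_files)

-- ===== LEMMAS AND PROOFS =====
theorem pvLoopA_eq (pfs : List String) :
    ∀ (its acc : List String) (k : Nat),
      k + (its.filter (fun t => PySem.Str.lower t == "nan")).length ≤ pfs.length →
      pvLoopA pfs its acc (k : Int) = acc.reverse ++ pvLoopB its (pfs.drop k) := by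
  intro its
  induction its with
  | nil => intro acc k _; simp [pvLoopA, pvLoopB]
  | cons t rest ih =>
    intro acc k h
    by_cases hc : (PySem.Str.lower t == "nan") = true
    · have hk : k < pfs.length := by
        simp [List.filter, hc] at h; omega
      have hget : PySem.List.pyGet? pfs (k : Int) = some (pfs[k]'hk) := by
        simp [PySem.List.pyGet?_natCast, List.getElem?_eq_getElem hk]
      have hstep : ((k : Int) + 1) = ((k + 1 : Nat) : Int) := by push_cast; ring
      simp only [pvLoopA, pvLoopB, hc, if_pos, hget, Option.getD_some, hstep]
      rw [ih ((pfs[k]'hk) :: acc) (k + 1) (by simp [List.filter, hc] at h ⊢; omega)]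
      simp [List.tail_drop, List.headD_eq_head?_getD, List.head?_drop,
            List.getElem?_eq_getElem hk]
    · rw [show pvLoopA pfs (t :: rest) acc (k : Int) = pvLoopA pfs rest ("" :: acc) (k : Int) by
          simp [pvLoopA, hc]]
      rw [ih ("" :: acc) k (by simp [List.filter, hc] at h ⊢; omega)]
      simp [pvLoopB, hc]

-- ===== VERDICT =====
theorem add_files_to_correct_rows_in_df_spec : Claim_equal_add_files_to_correct_rows_in_df := by
  intro its pfs _ hpre
  unfold Spec_add_files_to_correct_rows_in_df add_files_to_correct_rows_in_df add_files_to_correct_rows_in_df_alt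
  have := pvLoopA_eq pfs its [] 0 (by simpa using hpre)
  simpa using this
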